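-- pv_equiv track=rewrite | github.com/Grady10086/Mind-of-Thought | scripts/generate_expanded_evolution_data_v3.py | _same_category
-- ===== SOURCE A (Python) =====
-- def _same_category(label1: str, label2: str) -> bool:
--     """检查两个物体是否属于同一类别"""
--     l1 = label1.lower()
--     l2 = label2.lower()
--
--     categories = [
--         ['chair', 'seat', 'stool'],
--         ['table', 'desk'],
--         ['sofa', 'couch'],
--         ['lamp', 'light'],
--         ['tv', 'monitor', 'screen'],
--         ['door', 'entrance', 'exit'],
--         ['window'],
--         ['cabinet', 'shelf', 'bookshelf'],
--         ['bed'],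
--         ['plant', 'flower'],
--     ]
--
--     for category in categories:
--         if any(c in l1 for c in category) and any(c in l2 for c in category):
--             return True
--
--     return False
-- ===== SOURCE B (Python) =====
-- # Multi-pattern search by window hashing: one keyword->category dict,
-- # scan each label's substrings of the keyword lengths and look them up.
-- _KW = {
--     'chair': 0, 'seat': 0, 'stool': 0,
--     'table': 1, 'desk': 1,
--     'sofa': 2, 'couch': 2,
--     'lamp': 3, 'light': 3,
--     'tv': 4, 'monitor': 4, 'screen': 4,
--     'door': 5, 'entrance': 5, 'exit': 5,
--     'window': 6,
--     'cabinet': 7, 'shelf': 7, 'bookshelf': 7,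
--     'bed': 8,
--     'plant': 9, 'flower': 9,
-- }
-- _LENS = sorted({len(k) for k in _KW})
--
--
-- def _window_cats(label):
--     l = label.lower()
--     n = len(l)
--     cats = set()
--     for ln in _LENS:
--         for i in range(n - ln + 1):
--             cat = _KW.get(l[i:i + ln])
--             if cat is not None:
--                 cats.add(cat)
--     return cats
--
--
-- def _same_category(label1: str, label2: str) -> bool:
--     """检查两个物体是否属于同一类别"""
--     return not _window_cats(label1).isdisjoint(_window_cats(label2))
-- ===== Notes on version B (the rewrite author's own statement) =====
-- stated objective: alternative
-- what changed: Replaces A's per-category loop of keyword-in-label substring scans with a multi-pattern search: one keyword-to-category dictionary, a sliding-window pass over each label's substrings of the keyword lengths collecting matched category ids, then a set-disjointness test.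
import Mathlib
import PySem

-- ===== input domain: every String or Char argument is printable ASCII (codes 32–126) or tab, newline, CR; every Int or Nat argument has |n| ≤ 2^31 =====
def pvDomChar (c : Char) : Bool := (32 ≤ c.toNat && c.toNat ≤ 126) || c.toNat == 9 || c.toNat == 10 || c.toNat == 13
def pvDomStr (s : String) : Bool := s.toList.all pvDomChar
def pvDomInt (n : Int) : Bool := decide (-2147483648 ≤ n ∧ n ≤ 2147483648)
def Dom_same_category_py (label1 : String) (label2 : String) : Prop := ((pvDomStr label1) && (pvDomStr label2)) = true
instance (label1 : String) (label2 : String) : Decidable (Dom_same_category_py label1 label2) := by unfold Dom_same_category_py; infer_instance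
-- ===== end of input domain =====

-- B replaces A's per-category substring scans with a single keyword->category dictionary and a
-- sliding-window lookup over each label's substrings of the keyword lengths (alternative algorithm; trades per-keyword scans for per-window dict lookups, not faster).


-- ===== PORT A =====
def same_category_py (label1 : String) (label2 : String) : Bool :=
  let l1 := PySem.Str.lower label1
  let l2 := PySem.Str.lower label2
  let categories : List (List String) :=
    [["chair", "seat", "stool"],
     ["table", "desk"],
     ["sofa", "couch"],
     ["lamp", "light"],
     ["tv", "monitor", "screen"],
     ["door", "entrance", "exit"],
     ["window"],
     ["cabinet", "shelf", "bookshelf"],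
     ["bed"],
     ["plant", "flower"]]
  categories.any (fun category =>
    (category.any (fun c => PySem.Str.isIn c l1)) && (category.any (fun c => PySem.Str.isIn c l2)))

-- ===== PORT B =====
-- the module-level dict _KW = {'chair': 0, …} (strings as their char lists)
def pvKW : PySem.Dict (List Char) Int :=
  PySem.Dict.ofList
    [("chair".toList, 0), ("seat".toList, 0), ("stool".toList, 0),
     ("table".toList, 1), ("desk".toList, 1),
     ("sofa".toList, 2), ("couch".toList, 2),
     ("lamp".toList, 3), ("light".toList, 3),
     ("tv".toList, 4), ("monitor".toList, 4), ("screen".toList, 4),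
     ("door".toList, 5), ("entrance".toList, 5), ("exit".toList, 5),
     ("window".toList, 6),
     ("cabinet".toList, 7), ("shelf".toList, 7), ("bookshelf".toList, 7),
     ("bed".toList, 8),
     ("plant".toList, 9), ("flower".toList, 9)]

-- _LENS = sorted({len(k) for k in _KW})
def pvLens : List Int :=
  PySem.List.sorted (PySem.Set.ofList (pvKW.keys.map (fun k => (k.length : Int)))) (fun x => x) false

-- _window_cats(label)
def pvWindowCats (label : String) : PySem.Set Int :=
  let l := PySem.Chars.lower label.toList
  let n : Int := l.length
  pvLens.foldl (fun cats ln =>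
    (PySem.List.pyRange 0 (n - ln + 1) 1).foldl (fun cats i =>
      match PySem.Dict.get? pvKW (PySem.List.slice l (some i) (some (i + ln))) with
      | some cat => PySem.Set.add cats cat
      | none => cats) cats) PySem.Set.empty

def same_category_py_alt (label1 : String) (label2 : String) : Bool :=
  !(PySem.Set.isdisjoint (pvWindowCats label1) (pvWindowCats label2))

-- ===== PRECONDITION & SPEC =====
def Spec_same_category_py (label1 : String) (label2 : String) (out : Bool) : Prop := out = same_category_py_alt label1 label2
instance (label1 : String) (label2 : String) (out : Bool) : Decidable (Spec_same_category_py label1 label2 out) := by unfold Spec_same_category_py; infer_instance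

-- ===== CLAIM (what is proved, stated in full; the proofs are below) =====
def Claim_equal_same_category_py : Prop := ∀ (label1 : String) (label2 : String), Dom_same_category_py label1 label2 → Spec_same_category_py label1 label2 (same_category_py label1 label2)

-- ===== LEMMAS AND PROOFS =====

-- A's category table, restated for the lemmas (definitionally the literal inside same_category_py)
def pvCatsA : List (List String) :=
  [["chair", "seat", "stool"],
   ["table", "desk"],
   ["sofa", "couch"],
   ["lamp", "light"],
   ["tv", "monitor", "screen"],
   ["door", "entrance", "exit"],
   ["window"],
   ["cabinet", "shelf", "bookshelf"],
   ["bed"],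
   ["plant", "flower"]]

-- substring occurrence = some window of the substring's length matches
theorem pv_infix_iff_window (cs l : List Char) :
    cs <:+: l ↔ ∃ i, i + cs.length ≤ l.length ∧ (l.drop i).take cs.length = cs := by
  constructor
  · rintro ⟨s, t, rfl⟩
    refine ⟨s.length, by simp, ?_⟩
    rw [List.append_assoc, List.drop_left, List.take_left]
  · rintro ⟨i, hle, heq⟩
    exact heq ▸ (((List.take_prefix _ _).isInfix).trans (List.drop_suffix _ _).isInfix)

-- membership in the inner 'if _KW.get(window) is not None: cats.add(...)' loop
theorem pv_mem_foldl_optAdd {α : Type} (f : α → Option Int) (xs : List α) (s : PySem.Set Int) (v : Int) :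
    v ∈ xs.foldl (fun cats x =>
        match f x with
        | some c => PySem.Set.add cats c
        | none => cats) s ↔ v ∈ s ∨ ∃ x ∈ xs, f x = some v := by
  induction xs generalizing s with
  | nil => simp
  | cons hd tl ih =>
    simp only [List.foldl_cons, List.mem_cons]
    cases hfh : f hd with
    | none =>
      rw [ih]
      constructor
      · rintro (h | ⟨x, hx, hfx⟩)
        · exact Or.inl h
        · exact Or.inr ⟨x, Or.inr hx, hfx⟩
      · rintro (h | ⟨x, hx | hx, hfx⟩)
        · exact Or.inl h
        · subst hx; rw [hfh] at hfx; cases hfx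
        · exact Or.inr ⟨x, hx, hfx⟩
    | some c =>
      rw [ih]
      simp only [PySem.Set.mem_add]
      constructor
      · rintro ((h | h) | ⟨x, hx, hfx⟩)
        · exact Or.inl h
        · subst h; exact Or.inr ⟨hd, Or.inl rfl, hfh⟩
        · exact Or.inr ⟨x, Or.inr hx, hfx⟩
      · rintro (h | ⟨x, hx | hx, hfx⟩)
        · exact Or.inl (Or.inl h)
        · subst hx; rw [hfh] at hfx; exact Or.inl (Or.inr (Option.some_inj.mp hfx).symm)
        · exact Or.inr ⟨x, hx, hfx⟩

-- membership after the double loop of _window_cats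
theorem pv_mem_windowFold (l : List Char) (lens : List Int) (s : PySem.Set Int) (v : Int) :
    v ∈ lens.foldl (fun cats ln =>
        (PySem.List.pyRange 0 ((l.length : Int) - ln + 1) 1).foldl (fun cats i =>
          match PySem.Dict.get? pvKW (PySem.List.slice l (some i) (some (i + ln))) with
          | some cat => PySem.Set.add cats cat
          | none => cats) cats) s
      ↔ v ∈ s ∨ ∃ ln ∈ lens, ∃ i ∈ PySem.List.pyRange 0 ((l.length : Int) - ln + 1) 1,
          PySem.Dict.get? pvKW (PySem.List.slice l (some i) (some (i + ln))) = some v := by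
  induction lens generalizing s with
  | nil => simp
  | cons hd tl ih =>
    simp only [List.foldl_cons, List.mem_cons]
    rw [ih, pv_mem_foldl_optAdd]
    constructor
    · rintro ((h | ⟨i, hi, hget⟩) | ⟨ln, hln, i, hi, hget⟩)
      · exact Or.inl h
      · exact Or.inr ⟨hd, Or.inl rfl, i, hi, hget⟩
      · exact Or.inr ⟨ln, Or.inr hln, i, hi, hget⟩
    · rintro (h | ⟨ln, hln | hln, i, hi, hget⟩)
      · exact Or.inl (Or.inl h)
      · subst hln; exact Or.inl (Or.inr ⟨i, hi, hget⟩)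
      · exact Or.inr ⟨ln, hln, i, hi, hget⟩

theorem pv_keys_nodup : pvKW.keys.Nodup := by decide

theorem pv_len_mem_lens : ∀ p ∈ pvKW.items, ((p.1.length : Int)) ∈ pvLens := by decide

-- a category index is collected by _window_cats iff one of its keywords occurs in the lowered label
theorem pv_lens_ge_two : ∀ ln ∈ pvLens, (2 : Int) ≤ ln := by decide

-- a category index is collected by _window_cats iff one of its keywords occurs in the lowered label
theorem pv_mem_windowCats (label : String) (v : Int) :
    v ∈ pvWindowCats label ↔
      ∃ kw, (kw, v) ∈ pvKW.items ∧ kw <:+: PySem.Chars.lower label.toList := by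
  unfold pvWindowCats
  rw [pv_mem_windowFold]
  simp only [PySem.Set.empty, List.not_mem_nil, false_or]
  set l := PySem.Chars.lower label.toList with hl
  constructor
  · rintro ⟨ln, hln, i, hi, hget⟩
    have h0 : (0 : Int) ≤ i := ((PySem.List.mem_pyRange_one).mp hi).1
    have h1 : (0 : Int) ≤ i + ln := by have := pv_lens_ge_two ln hln; omega
    refine ⟨_, (PySem.Dict.get?_eq_some_iff_mem_items _ _ _ pv_keys_nodup).mp hget, ?_⟩
    rw [PySem.List.slice_toNat l h0 h1]
    exact ((List.take_prefix _ _).isInfix).trans (List.drop_suffix _ _).isInfix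
  · rintro ⟨kw, hmem, hinf⟩
    obtain ⟨i, hle, heq⟩ := (pv_infix_iff_window kw l).mp hinf
    have hlen := pv_len_mem_lens _ hmem
    refine ⟨(kw.length : Int), hlen, (i : Int), ?_, ?_⟩
    · rw [PySem.List.mem_pyRange_one]
      refine ⟨Int.natCast_nonneg i, by omega⟩
    · rw [PySem.List.slice_toNat l (Int.natCast_nonneg i) (by positivity)]
      have hm : ((i : Int) + (kw.length : Int)).toNat - i = kw.length := by omega
      rw [Int.toNat_natCast, hm, heq]
      exact (PySem.Dict.get?_eq_some_iff_mem_items _ _ _ pv_keys_nodup).mpr hmem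

-- bridges between A's category table and B's keyword dict (finite checks)
theorem pv_cat_to_kw : ∀ cat ∈ pvCatsA, ∃ v ∈ ([0,1,2,3,4,5,6,7,8,9] : List Int),
    ∀ c ∈ cat, (c.toList, v) ∈ pvKW.items := by decide

theorem pv_kw_to_cat : ∀ p ∈ pvKW.items, ∀ q ∈ pvKW.items, p.2 = q.2 →
    ∃ cat ∈ pvCatsA, p.1 ∈ cat.map String.toList ∧ q.1 ∈ cat.map String.toList := by decide

-- ===== VERDICT (by name: the statement is the Claim_ definition above) =====
theorem same_category_py_spec : Claim_equal_same_category_py := by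
  intro label1 label2 _
  unfold Spec_same_category_py same_category_py same_category_py_alt
  rw [Bool.eq_iff_iff]
  have hB : (!(PySem.Set.isdisjoint (pvWindowCats label1) (pvWindowCats label2))) = true
      ↔ ∃ v, v ∈ pvWindowCats label1 ∧ v ∈ pvWindowCats label2 := by
    rw [Bool.not_eq_true', ← Bool.not_eq_true, PySem.Set.isdisjoint_iff]
    push Not
    exact Iff.rfl
  rw [hB]
  show pvCatsA.any _ = true ↔ _
  simp only [List.any_eq_true, Bool.and_eq_true, PySem.Str.isIn_iff_infix,
    PySem.Str.toList_lower]
  constructor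
  · rintro ⟨cat, hcat, ⟨c1, hc1, h1⟩, ⟨c2, hc2, h2⟩⟩
    obtain ⟨v, _, hall⟩ := pv_cat_to_kw cat hcat
    exact ⟨v, (pv_mem_windowCats label1 v).mpr ⟨c1.toList, hall c1 hc1, h1⟩,
           (pv_mem_windowCats label2 v).mpr ⟨c2.toList, hall c2 hc2, h2⟩⟩
  · rintro ⟨v, hv1, hv2⟩
    obtain ⟨kw1, hm1, hi1⟩ := (pv_mem_windowCats label1 v).mp hv1
    obtain ⟨kw2, hm2, hi2⟩ := (pv_mem_windowCats label2 v).mp hv2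
    obtain ⟨cat, hcat, hk1, hk2⟩ := pv_kw_to_cat (kw1, v) hm1 (kw2, v) hm2 rfl
    obtain ⟨c1, hc1, hceq1⟩ := List.mem_map.mp hk1
    obtain ⟨c2, hc2, hceq2⟩ := List.mem_map.mp hk2
    exact ⟨cat, hcat, ⟨c1, hc1, hceq1 ▸ hi1⟩, ⟨c2, hc2, hceq2 ▸ hi2⟩⟩
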